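-- pv_equiv track=rewrite | github.com/aybasaran/scrape-sariyerposta | utils/helpers.py | findUrlsStats
-- ===== SOURCE A (Python) =====
-- import math
--
-- def findUrlsStats(urls: list[str]) -> tuple[int, int, int]:
--     total = 0
--     min = 0
--     max = 0
--     # find min and max length of urls
--     for url in urls:
--         total += len(url)
--         if min == 0 or len(url) < min:
--             min = len(url)
--         if max == 0 or len(url) > max:
--             max = len(url)
--
--     return min, max, math.floor(total / len(urls))
-- ===== SOURCE B (Python) =====
-- import math
--
-- def findUrlsStats(urls):
--     lengths = [len(url) for url in urls]
--     avg = math.floor(sum(lengths) / len(urls))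
--     return min(lengths), max(lengths), avg
-- ===== Notes on version B (the rewrite author's own statement) =====
-- stated objective: idiomatic
-- what changed: Replaces A's single fused loop with 0-sentinel min/max/total tracking by a precomputed lengths list and the built-ins min/max/sum (average computed first, so the empty list still divides by zero); Pre_ excludes lists that contain an empty url string -- not a URL at all -- without ending in one, where A's 0-sentinel makes its running minimum restart after the last empty entry, an artefact of the sentinel that the natural minimum cannot match (B returns the true minimum 0 there).
-- outside the precondition, e.g. on findUrlsStats(['', 'a']): A returns (1, 1, 0), B returns (0, 1, 0)
import Mathlib
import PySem

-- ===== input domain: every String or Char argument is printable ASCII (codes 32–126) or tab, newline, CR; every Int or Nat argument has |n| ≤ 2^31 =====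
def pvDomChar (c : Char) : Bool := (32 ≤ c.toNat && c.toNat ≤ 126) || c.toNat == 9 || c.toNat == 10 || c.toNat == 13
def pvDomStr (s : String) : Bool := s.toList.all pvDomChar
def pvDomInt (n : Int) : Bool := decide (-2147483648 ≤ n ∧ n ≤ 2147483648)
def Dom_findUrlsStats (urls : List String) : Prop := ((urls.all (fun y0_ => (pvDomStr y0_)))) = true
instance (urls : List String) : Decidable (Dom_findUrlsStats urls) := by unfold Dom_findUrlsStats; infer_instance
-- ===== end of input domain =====

-- B is the idiomatic version: a precomputed lengths list and the built-ins min/max/sum.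

-- ===== PORT A =====
-- one loop step of A: updates (total, min, max) with one url length
def pvStepA (st : Int × Int × Int) (l : Int) : Int × Int × Int :=
  (st.1 + l,
   if st.2.1 == 0 || l < st.2.1 then l else st.2.1,
   if st.2.2 == 0 || l > st.2.2 then l else st.2.2)

def findUrlsStats (urls : List String) : Int × Int × Int :=
  let st := urls.foldl (fun st url => pvStepA st (PySem.Str.len url)) (0, 0, 0)
  (st.2.1, st.2.2, PySem.Int.floordiv st.1 (urls.length : Int))

-- ===== PORT B =====
-- min(lengths)/max(lengths) → PySem.List.min?/max? (some on the nonempty lists Pre_ admits)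
def findUrlsStats_alt (urls : List String) : Int × Int × Int :=
  let lengths := urls.map (fun url => PySem.Str.len url)
  let avg := PySem.Int.floordiv lengths.sum (urls.length : Int)
  ((PySem.List.min? lengths (fun x => x)).getD 0,
   (PySem.List.max? lengths (fun x => x)).getD 0,
   avg)

-- ===== PRECONDITION & SPEC =====
-- Pre_ excludes the empty list (both Pythons raise ZeroDivisionError) and lists that contain an
-- empty url string — not a URL at all — without ending in one: there A's 0-sentinel makes its
-- running minimum restart after the last empty entry, an artefact of the sentinel that the
-- natural minimum cannot match (B returns the true minimum 0 there); lists ending in an empty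
-- url stay inside Pre_ (both return minimum 0).
def Pre_findUrlsStats (urls : List String) : Prop :=
  urls ≠ [] ∧ ("" ∈ urls → urls.getLast? = some "")
instance (urls : List String) : Decidable (Pre_findUrlsStats urls) := by unfold Pre_findUrlsStats; infer_instance
def pvWitness_findUrlsStats : List String := (["http://a.example", "x"])

def Spec_findUrlsStats (urls : List String) (out : Int × Int × Int) : Prop := out = findUrlsStats_alt urls
instance (urls : List String) (out : Int × Int × Int) : Decidable (Spec_findUrlsStats urls out) := by unfold Spec_findUrlsStats; infer_instance

-- ===== CLAIM (what is proved, stated in full; the proofs are below) =====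
def Claim_equal_findUrlsStats : Prop := ∀ (urls : List String), Dom_findUrlsStats urls → Pre_findUrlsStats urls → Spec_findUrlsStats urls (findUrlsStats urls)

-- ===== LEMMAS AND PROOFS =====

-- A's min update and max update, as functions on the running value and one length
def pvFMin (m l : Int) : Int := if m == 0 || l < m then l else m
def pvFMax (m l : Int) : Int := if m == 0 || l > m then l else m

theorem pvStepA_split : ∀ (L : List Int) (t m M : Int),
    L.foldl pvStepA (t, m, M) = (t + L.sum, L.foldl pvFMin m, L.foldl pvFMax M) := by
  intro L
  induction L with
  | nil => intro t m M; simp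
  | cons l L ih =>
    intro t m M
    simp only [List.foldl_cons, List.sum_cons, pvStepA, pvFMin, pvFMax, ih]
    ring_nf

theorem pvFoldMin_nonneg : ∀ (L : List Int) (m : Int), 0 ≤ m → (∀ l ∈ L, 0 ≤ l) →
    0 ≤ L.foldl pvFMin m := by
  intro L
  induction L with
  | nil => intro m hm _; simpa using hm
  | cons l L ih =>
    intro m hm hL
    simp only [List.foldl_cons]
    refine ih _ ?_ (fun x hx => hL x (List.mem_cons_of_mem _ hx))
    have hl : 0 ≤ l := hL l (List.mem_cons_self ..)
    unfold pvFMin; split <;> omega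

theorem pvFoldMax_eq_max : ∀ (L : List Int) (m : Int), 0 ≤ m → (∀ l ∈ L, 0 ≤ l) →
    L.foldl pvFMax m = L.foldl max m := by
  intro L
  induction L with
  | nil => intro _ _ _; rfl
  | cons l L ih =>
    intro m hm hL
    have hl : 0 ≤ l := hL l (List.mem_cons_self ..)
    simp only [List.foldl_cons]
    have h1 : pvFMax m l = max m l := by
      unfold pvFMax; split <;> rename_i h <;>
        simp only [Bool.or_eq_true, beq_iff_eq, decide_eq_true_eq, not_or] at h <;> omega
    rw [h1, ih _ (by omega) (fun x hx => hL x (List.mem_cons_of_mem _ hx))]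

theorem pvFoldMin_eq_min : ∀ (L : List Int) (m : Int), 0 < m → (∀ l ∈ L, 0 < l) →
    L.foldl pvFMin m = L.foldl min m := by
  intro L
  induction L with
  | nil => intro _ _ _; rfl
  | cons l L ih =>
    intro m hm hL
    have hl : 0 < l := hL l (List.mem_cons_self ..)
    simp only [List.foldl_cons]
    have h1 : pvFMin m l = min m l := by
      unfold pvFMin; split <;> rename_i h <;>
        simp only [Bool.or_eq_true, beq_iff_eq, decide_eq_true_eq, not_or] at h <;> omega
    rw [h1, ih _ (by omega) (fun x hx => hL x (List.mem_cons_of_mem _ hx))]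

theorem pvFMin_zero_right (m : Int) (hm : 0 ≤ m) : pvFMin m 0 = 0 := by
  unfold pvFMin; split <;> rename_i h <;>
    simp only [Bool.or_eq_true, beq_iff_eq, decide_eq_true_eq, not_or] at h <;> omega

theorem pvLen_nonneg (s : String) : 0 ≤ PySem.Str.len s := by
  simp [PySem.Str.len_eq]

theorem pvLen_eq_zero_iff (s : String) : PySem.Str.len s = 0 ↔ s = "" := by
  rw [PySem.Str.len_eq]
  constructor
  · intro h
    have h1 : s.toList = [] := List.length_eq_zero_iff.mp (by exact_mod_cast h)
    have h2 := congrArg String.ofList h1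
    simpa using h2
  · intro h; subst h; rfl

-- A's fold over urls, rewritten over the list of lengths
theorem pvA_eq (urls : List String) :
    findUrlsStats urls =
      ((urls.map (fun u => PySem.Str.len u)).foldl pvFMin 0,
       (urls.map (fun u => PySem.Str.len u)).foldl pvFMax 0,
       PySem.Int.floordiv (urls.map (fun u => PySem.Str.len u)).sum (urls.length : Int)) := by
  unfold findUrlsStats
  rw [← List.foldl_map, pvStepA_split]
  simp only [zero_add]

theorem pvMembers_nonneg (urls : List String) :
    ∀ l ∈ urls.map (fun u => PySem.Str.len u), 0 ≤ l := by
  intro l hl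
  rcases List.mem_map.mp hl with ⟨u, _, rfl⟩
  exact pvLen_nonneg u

-- A's running min over an all-positive list, started at 0, is the built-in min
theorem pvAmin_pos (K : List Int) (hK : ∀ l ∈ K, 0 < l) :
    K.foldl pvFMin 0 = ((PySem.List.min? K (fun x => x)).getD 0) := by
  cases K with
  | nil => rfl
  | cons k t =>
    rw [PySem.List.min?_id_cons, Option.getD_some, List.foldl_cons]
    have h0 : pvFMin 0 k = k := by unfold pvFMin; simp
    rw [h0]
    exact pvFoldMin_eq_min t k (hK k (List.mem_cons_self ..))
      (fun x hx => hK x (List.mem_cons_of_mem _ hx))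

-- foldl min is a lower bound of its start …
theorem pvFoldlMin_le_init : ∀ (t : List Int) (k : Int), t.foldl min k ≤ k := by
  intro t
  induction t with
  | nil => intro k; exact le_refl _
  | cons a t ih =>
    intro k
    simp only [List.foldl_cons]
    exact le_trans (ih (min k a)) (min_le_left _ _)

-- … and of its elements
theorem pvFoldlMin_le_mem : ∀ (t : List Int) (k x : Int), x ∈ t → t.foldl min k ≤ x := by
  intro t
  induction t with
  | nil => intro k x hx; cases hx
  | cons a t ih =>
    intro k x hx
    simp only [List.foldl_cons]
    rcases List.mem_cons.mp hx with h | h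
    · rw [h]; exact le_trans (pvFoldlMin_le_init t (min k a)) (min_le_right _ _)
    · exact ih (min k a) x h

theorem pvFoldlMin_nonneg : ∀ (t : List Int) (k : Int), 0 ≤ k → (∀ l ∈ t, 0 ≤ l) →
    0 ≤ t.foldl min k := by
  intro t
  induction t with
  | nil => intro k hk _; simpa using hk
  | cons a t ih =>
    intro k hk hl
    simp only [List.foldl_cons]
    exact ih _ (le_min hk (hl a (List.mem_cons_self ..)))
      (fun x hx => hl x (List.mem_cons_of_mem _ hx))

-- B's min is 0 whenever 0 is among the (nonnegative) lengths
theorem pvBmin_zero (L : List Int) (h0 : (0 : Int) ∈ L) (hn : ∀ l ∈ L, 0 ≤ l) :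
    ((PySem.List.min? L (fun x => x)).getD 0) = 0 := by
  cases L with
  | nil => cases h0
  | cons k t =>
    rw [PySem.List.min?_id_cons, Option.getD_some]
    have hle : t.foldl min k ≤ 0 := by
      rcases List.mem_cons.mp h0 with h | h
      · exact h ▸ pvFoldlMin_le_init t k
      · exact pvFoldlMin_le_mem t k 0 h
    have hge : 0 ≤ t.foldl min k :=
      pvFoldlMin_nonneg t k (hn k (List.mem_cons_self ..))
        (fun x hx => hn x (List.mem_cons_of_mem _ hx))
    omega

-- A's min on p ++ [""] : the sentinel zero-step at the end leaves 0
theorem pvAmin_trailing (p : List String) :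
    ((p ++ [""]).map (fun u => PySem.Str.len u)).foldl pvFMin 0 = 0 := by
  simp only [List.map_append, List.map_cons, List.map_nil, List.foldl_append, List.foldl_cons,
    List.foldl_nil]
  rw [show PySem.Str.len "" = 0 from rfl,
      pvFMin_zero_right _ (pvFoldMin_nonneg _ 0 le_rfl (pvMembers_nonneg p))]

-- the max components of A and B agree on any nonempty list
theorem pvMax_agree (u : String) (us : List String) :
    ((u :: us).map (fun url => PySem.Str.len url)).foldl pvFMax 0
      = ((PySem.List.max? ((u :: us).map (fun url => PySem.Str.len url)) (fun x => x)).getD 0) := by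
  simp only [List.map_cons]
  rw [PySem.List.max?_id_cons, Option.getD_some, List.foldl_cons]
  have h0 : pvFMax 0 (PySem.Str.len u) = PySem.Str.len u := by unfold pvFMax; simp
  rw [h0]
  exact pvFoldMax_eq_max _ _ (pvLen_nonneg u) (pvMembers_nonneg us)

-- ===== VERDICT (by name: the statement is the Claim_ definition above) =====
theorem findUrlsStats_spec : Claim_equal_findUrlsStats := by
  intro urls _ hpre
  obtain ⟨hne, hlastimp⟩ := hpre
  obtain ⟨u, us, rfl⟩ : ∃ u us, urls = u :: us := by
    cases urls with
    | nil => exact absurd rfl hne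
    | cons u us => exact ⟨u, us, rfl⟩
  unfold Spec_findUrlsStats
  rw [pvA_eq]
  unfold findUrlsStats_alt
  simp only [Prod.mk.injEq]
  refine ⟨?_, pvMax_agree u us, trivial⟩
  by_cases hmem : "" ∈ u :: us
  · -- the list ends in an empty url: both minima are 0
    obtain ⟨p, hp⟩ : ∃ p, u :: us = p ++ [""] := by
      rcases List.getLast?_eq_some_iff.mp (hlastimp hmem) with ⟨p, hp⟩
      exact ⟨p, hp⟩
    rw [hp, pvAmin_trailing]
    have h0mem : (0 : Int) ∈ (p ++ [""]).map (fun url => PySem.Str.len url) := by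
      simp [PySem.Str.len_eq]
    exact (pvBmin_zero _ h0mem (pvMembers_nonneg _)).symm
  · -- no empty url: all lengths positive, both sides are the plain minimum
    refine pvAmin_pos _ ?_
    intro l hl
    rcases List.mem_map.mp hl with ⟨v, hv, rfl⟩
    have h0 := pvLen_nonneg v
    have : PySem.Str.len v ≠ 0 := by
      intro h; exact hmem ((pvLen_eq_zero_iff v).mp h ▸ hv)
    omega
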